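-- pv_equiv track=rewrite | github.com/spegeerino/projects | Project Euler/projeuler719.py | all_splits
-- ===== SOURCE A (Python) =====
-- def all_splits(n, orig_n = 0):
--     if n < 10:
--         return [[n]]
--     excl_last = all_splits(n//10, orig_n)
--     out = []
--     last = n % 10
--     for lst in excl_last:
--         concat = list(lst)
--         concat[-1] = concat[-1] * 10 + last
--         if concat[-1] <= orig_n:
--             out.append(concat)
--         addit = list(lst)
--         addit.append(last)
--         out.append(addit)
--     return out
-- ===== SOURCE B (Python) =====
-- def _cut(rev, mask):
--     # rev: digits least-significant first, nonempty.
--     # Returns the parts of the splitting selected by mask (bit 0 = rightmost gap,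
--     # bit set = break there), most-significant part first, as (value, ndigits).
--     if len(rev) == 1:
--         return [(rev[0], 1)]
--     parts = _cut(rev[1:], mask >> 1)
--     d = rev[0]
--     if mask & 1:
--         parts.append((d, 1))
--     else:
--         v, k = parts[-1]
--         parts[-1] = (v * 10 + d, k + 1)
--     return parts
--
--
-- def all_splits(n, orig_n=0):
--     if n < 10:
--         return [[n]]
--     rev = []  # digits of n, least-significant first
--     m = n
--     while m > 0:
--         rev.append(m % 10)
--         m //= 10
--     out = []
--     for mask in range(2 ** (len(rev) - 1)):
--         parts = _cut(rev, mask)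
--         if all(k == 1 or v <= orig_n for (v, k) in parts):
--             out.append([v for (v, k) in parts])
--     return out
-- ===== Notes on version B (the rewrite author's own statement) =====
-- stated objective: alternative
-- what changed: Replaces A's recursion on n//10 (which extends or splits each partial splitting digit by digit, pruning as it goes) by a direct enumeration of all 2^(L-1) breakpoint masks over the digit list: each mask is cut into contiguous parts and kept iff every multi-digit part is <= orig_n.
import Mathlib
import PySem

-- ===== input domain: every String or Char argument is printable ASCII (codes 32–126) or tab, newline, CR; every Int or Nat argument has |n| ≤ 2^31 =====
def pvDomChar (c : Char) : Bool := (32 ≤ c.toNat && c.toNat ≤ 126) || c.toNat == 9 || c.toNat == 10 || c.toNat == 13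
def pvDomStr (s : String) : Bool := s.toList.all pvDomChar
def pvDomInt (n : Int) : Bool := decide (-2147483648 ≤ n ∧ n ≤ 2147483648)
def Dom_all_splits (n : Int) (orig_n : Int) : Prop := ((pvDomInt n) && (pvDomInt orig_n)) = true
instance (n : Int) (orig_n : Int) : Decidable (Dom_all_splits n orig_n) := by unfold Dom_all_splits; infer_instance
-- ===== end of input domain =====

-- B replaces A's recursion on n//10 by an explicit enumeration of all 2^(L-1) breakpoint
-- masks over the digit list, cutting and filtering each candidate splitting; alternative
-- decomposition of the same exponential enumeration (not claimed faster).

-- ===== PORT A =====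
def all_splits (n : Int) (orig_n : Int) : List (List Int) :=
  if _h : n < 10 then [[n]]
  else
    let excl_last := all_splits (PySem.Int.floordiv n 10) orig_n
    let last := PySem.Int.mod n 10
    excl_last.foldl (fun out lst =>
      -- concat = list(lst); concat[-1] = concat[-1]*10 + last  (every lst is nonempty,
      -- so the negative-index access never raises; getD's default is never used)
      let c := ((PySem.List.pyGet? lst (-1)).getD 0) * 10 + last
      (if c ≤ orig_n then out ++ [lst.dropLast ++ [c]] else out) ++ [lst ++ [last]]) []
termination_by n.toNat
decreasing_by
  rw [PySem.Int.floordiv_eq_ediv_of_pos (by norm_num : (0:Int) < 10)]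
  omega

-- ===== PORT B =====
-- rev: digits of n, least-significant first (loop `while m > 0`)
def digitsRevB (m : Int) : List Int :=
  if _h : 0 < m then PySem.Int.mod m 10 :: digitsRevB (PySem.Int.floordiv m 10) else []
termination_by m.toNat
decreasing_by
  rw [PySem.Int.floordiv_eq_ediv_of_pos (by norm_num : (0:Int) < 10)]
  omega

-- _cut of Source B: parts (value, ndigits) of the splitting chosen by mask, bit 0 = rightmost gap
def cutB : List Int → Nat → List (Int × Nat)
  | [], _ => []          -- unreachable: rev is always nonempty
  | [d], _ => [(d, 1)]
  | d :: e :: rest, mask =>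
    let parts := cutB (e :: rest) (mask / 2)
    if mask % 2 = 1 then parts ++ [(d, 1)]
    else
      -- parts is nonempty, so getLastD's default is never used
      let p := parts.getLastD (0, 0)
      parts.dropLast ++ [(p.1 * 10 + d, p.2 + 1)]

def all_splits_alt (n : Int) (orig_n : Int) : List (List Int) :=
  if n < 10 then [[n]]
  else
    let rev := digitsRevB n
    (PySem.List.pyRange 0 ((2 : Int) ^ (rev.length - 1)) 1).foldl (fun out mask =>
      let parts := cutB rev mask.toNat
      if parts.all (fun p => p.2 == 1 || decide (p.1 ≤ orig_n)) then
        out ++ [parts.map Prod.fst]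
      else out) []

-- ===== PRECONDITION & SPEC =====
def Spec_all_splits (n : Int) (orig_n : Int) (out : List (List Int)) : Prop := out = all_splits_alt n orig_n
instance (n : Int) (orig_n : Int) (out : List (List Int)) : Decidable (Spec_all_splits n orig_n out) := by unfold Spec_all_splits; infer_instance

-- ===== CLAIM (what is proved, stated in full; the proofs are below) =====
def Claim_equal_all_splits : Prop := ∀ (n : Int) (orig_n : Int), Dom_all_splits n orig_n → Spec_all_splits n orig_n (all_splits n orig_n)

-- ===== LEMMAS AND PROOFS =====

def okPart (orig : Int) (p : Int × Nat) : Bool := p.2 == 1 || decide (p.1 ≤ orig)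

def Ecore (rev : List Int) (orig : Int) : List (List Int) :=
  (PySem.List.pyRange 0 ((2 : Int) ^ (rev.length - 1)) 1).foldl (fun out mask =>
    let parts := cutB rev mask.toNat
    if parts.all (okPart orig) then out ++ [parts.map Prod.fst] else out) []

-- the per-element emission of A's loop body
def gA (d orig : Int) (lst : List Int) : List (List Int) :=
  (if ((PySem.List.pyGet? lst (-1)).getD 0) * 10 + d ≤ orig then
      [lst.dropLast ++ [((PySem.List.pyGet? lst (-1)).getD 0) * 10 + d]]
    else []) ++ [lst ++ [d]]

lemma alt_eq_Ecore (n orig : Int) (h : ¬ n < 10) :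
    all_splits_alt n orig = Ecore (digitsRevB n) orig := by
  simp only [all_splits_alt, Ecore, h, if_false]
  rfl

lemma Ecore_filter (rev : List Int) (orig : Int) :
    Ecore rev orig =
      ((PySem.List.pyRange 0 ((2 : Int) ^ (rev.length - 1)) 1).filter
          (fun mask => (cutB rev mask.toNat).all (okPart orig))).map
        (fun mask => (cutB rev mask.toNat).map Prod.fst) := by
  unfold Ecore
  have h := PySem.List.foldl_append_if
    (fun mask : Int => (cutB rev mask.toNat).all (okPart orig))
    (fun mask : Int => (cutB rev mask.toNat).map Prod.fst)
    (PySem.List.pyRange 0 ((2 : Int) ^ (rev.length - 1)) 1) []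
  simpa using h

lemma digitsRev_small (n : Int) (h0 : 0 < n) (h : n < 10) : digitsRevB n = [n] := by
  have h1 : PySem.Int.mod n 10 = n := by
    rw [PySem.Int.mod_eq_emod_of_pos (by norm_num : (0:Int) < 10)]; omega
  have h2 : PySem.Int.floordiv n 10 = 0 := by
    rw [PySem.Int.floordiv_eq_ediv_of_pos (by norm_num : (0:Int) < 10)]; omega
  rw [digitsRevB, dif_pos h0, h1, h2, digitsRevB]
  simp

lemma digitsRev_step (n : Int) (h : 10 ≤ n) :
    digitsRevB n = PySem.Int.mod n 10 :: digitsRevB (PySem.Int.floordiv n 10) := by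
  rw [digitsRevB, dif_pos (by omega : (0:Int) < n)]

lemma digitsRev_mem (n : Int) : ∀ x ∈ digitsRevB n, 0 ≤ x ∧ x < 10 := by
  induction n using digitsRevB.induct with
  | case1 m h ih =>
    rw [digitsRevB, dif_pos h]
    intro x hx
    rcases List.mem_cons.mp hx with rfl | hx
    · exact ⟨PySem.Int.mod_nonneg m (by norm_num), PySem.Int.mod_lt m (by norm_num)⟩
    · exact ih x hx
  | case2 m h => rw [digitsRevB, dif_neg h]; simp

lemma digitsRev_ne_nil (n : Int) (h : 0 < n) : digitsRevB n ≠ [] := by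
  rw [digitsRevB, dif_pos h]; simp

lemma cutB_ne_nil (x : Int) (xs : List Int) (mask : Nat) : cutB (x :: xs) mask ≠ [] := by
  cases xs with
  | nil => simp [cutB]
  | cons e rest =>
    rw [cutB]
    split <;> simp

lemma cutB_shape (rev : List Int) : ∀ (mask : Nat), (∀ x ∈ rev, 0 ≤ x) →
    ∀ p ∈ cutB rev mask, 0 ≤ p.1 ∧ 1 ≤ p.2 := by
  induction rev with
  | nil => simp [cutB]
  | cons d tl ih =>
    intro mask hd
    cases tl with
    | nil =>
      simp only [cutB, List.mem_singleton]
      rintro p rfl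
      exact ⟨hd d (by simp), le_refl 1⟩
    | cons e rest =>
      have hd' : ∀ x ∈ e :: rest, 0 ≤ x := fun x hx => hd x (List.mem_cons_of_mem d hx)
      have ih' := ih (mask / 2) hd'
      rw [cutB]
      split
      · intro p hp
        rcases List.mem_append.mp hp with hp | hp
        · exact ih' p hp
        · simp only [List.mem_singleton] at hp
          subst hp
          exact ⟨hd d (by simp), le_refl 1⟩
      · intro p hp
        rcases List.mem_append.mp hp with hp | hp
        · exact ih' p (List.dropLast_subset _ hp)
        · simp only [List.mem_singleton] at hp
          subst hp
          have hne := cutB_ne_nil e rest (mask / 2)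
          have hmem : (cutB (e :: rest) (mask / 2)).getLastD (0, 0) ∈ cutB (e :: rest) (mask / 2) := by
            rcases List.eq_nil_or_concat (cutB (e :: rest) (mask / 2)) with h | ⟨a, b, h⟩
            · exact absurd h hne
            · rw [h]; simp [List.concat_eq_append]
          have hp' := ih' _ hmem
          refine ⟨?_, by omega⟩
          have h1 := hp'.1
          have h2 := hd d (by simp : d ∈ d :: e :: rest)
          omega

lemma cutB_even (d e : Int) (rest : List Int) (t : Nat) :
    cutB (d :: e :: rest) (2 * t) =
      (cutB (e :: rest) t).dropLast ++
        [(((cutB (e :: rest) t).getLastD (0, 0)).1 * 10 + d,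
          ((cutB (e :: rest) t).getLastD (0, 0)).2 + 1)] := by
  rw [cutB]
  simp [Nat.mul_mod_right]

lemma cutB_odd (d e : Int) (rest : List Int) (t : Nat) :
    cutB (d :: e :: rest) (2 * t + 1) = cutB (e :: rest) t ++ [(d, 1)] := by
  rw [cutB]
  simp [Nat.mul_add_div]

lemma range_double (k : Nat) :
    PySem.List.pyRange 0 (2 * (k : Int)) 1 =
      (PySem.List.pyRange 0 (k : Int) 1).flatMap (fun m => [2 * m, 2 * m + 1]) := by
  induction k with
  | zero => simp [PySem.List.pyRange_one_eq_nil]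
  | succ k ih =>
    have h1 : (0:Int) ≤ 2 * k := by positivity
    have h2 : (0:Int) ≤ 2 * k + 1 := by positivity
    have h3 : (0:Int) ≤ k := by positivity
    have e1 : (2 : Int) * ((k : Int) + 1) = (2 * k + 1) + 1 := by ring
    push_cast
    rw [e1, PySem.List.pyRange_one_succ_right h2, PySem.List.pyRange_one_succ_right h1,
      PySem.List.pyRange_one_succ_right h3, ih]
    simp

lemma filterMap_flatMap {α β γ : Type} (l : List α) (h : α → List β) (p : β → Bool) (f : β → γ) :
    ((l.flatMap h).filter p).map f = l.flatMap (fun x => (((h x).filter p).map f)) := by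
  induction l with
  | nil => simp
  | cons a l ih => simp [List.flatMap_cons, List.filter_append, ih]

lemma flatMap_filtermap_if {α β γ : Type} (l : List α) (p : α → Bool) (f : α → β) (g : β → List γ) :
    ((l.filter p).map f).flatMap g = l.flatMap (fun x => if p x then g (f x) else []) := by
  induction l with
  | nil => simp
  | cons a l ih =>
    by_cases h : p a <;> simp [h, ih]

lemma filter_map_pair {α β : Type} (a b : α) (p : α → Bool) (f : α → β) :
    ([a, b].filter p).map f =
      (if p a then [f a] else []) ++ (if p b then [f b] else []) := by
  by_cases ha : p a <;> by_cases hb : p b <;> simp [ha, hb]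

lemma perMask (d orig e : Int) (rest : List Int) (hd0 : 0 ≤ d)
    (hdig : ∀ x ∈ e :: rest, 0 ≤ x) (m : Int) (hm : 0 ≤ m) :
    (([2 * m, 2 * m + 1].filter
        (fun mask => (cutB (d :: e :: rest) mask.toNat).all (okPart orig))).map
      (fun mask => (cutB (d :: e :: rest) mask.toNat).map Prod.fst))
    = (if (cutB (e :: rest) m.toNat).all (okPart orig) then
        gA d orig ((cutB (e :: rest) m.toNat).map Prod.fst)
      else []) := by
  obtain ⟨init, lastp, hparts⟩ : ∃ init lastp, cutB (e :: rest) m.toNat = init ++ [lastp] := by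
    rcases List.eq_nil_or_concat (cutB (e :: rest) m.toNat) with h | ⟨a, b, h⟩
    · exact absurd h (cutB_ne_nil e rest m.toNat)
    · exact ⟨a, b, by simpa [List.concat_eq_append] using h⟩
  have hshape := cutB_shape (e :: rest) m.toNat hdig
  have hlast : 0 ≤ lastp.1 ∧ 1 ≤ lastp.2 := hshape lastp (by rw [hparts]; simp)
  have e2 : (2 * m).toNat = 2 * m.toNat := by omega
  have e3 : (2 * m + 1).toNat = 2 * m.toNat + 1 := by omega
  have hev : cutB (d :: e :: rest) (2 * m).toNat = init ++ [(lastp.1 * 10 + d, lastp.2 + 1)] := by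
    rw [e2, cutB_even, hparts, List.getLastD_concat, List.dropLast_concat]
  have hod : cutB (d :: e :: rest) (2 * m + 1).toNat = (init ++ [lastp]) ++ [(d, 1)] := by
    rw [e3, cutB_odd, hparts]
  have hget : ((PySem.List.pyGet? ((init ++ [lastp]).map Prod.fst) (-1)).getD 0) = lastp.1 := by
    rw [PySem.List.pyGet?_neg_one]
    simp
  have hOk1 : okPart orig (d, 1) = true := by simp [okPart]
  have hne1 : ((lastp.2 + 1 : Nat) == 1) = false := by
    have := hlast.2; simp; omega
  have hOkExt : okPart orig (lastp.1 * 10 + d, lastp.2 + 1) = decide (lastp.1 * 10 + d ≤ orig) := by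
    simp [okPart, hne1]
  have pEv : (cutB (d :: e :: rest) (2 * m).toNat).all (okPart orig)
      = (init.all (okPart orig) && decide (lastp.1 * 10 + d ≤ orig)) := by
    rw [hev]; simp [List.all_append, hOkExt]
  have pOd : (cutB (d :: e :: rest) (2 * m + 1).toNat).all (okPart orig)
      = (init.all (okPart orig) && okPart orig lastp) := by
    rw [hod]; simp [List.all_append, hOk1]
  have pAll : (cutB (e :: rest) m.toNat).all (okPart orig)
      = (init.all (okPart orig) && okPart orig lastp) := by
    rw [hparts]; simp [List.all_append]
  have fEv : (cutB (d :: e :: rest) (2 * m).toNat).map Prod.fst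
      = init.map Prod.fst ++ [lastp.1 * 10 + d] := by rw [hev]; simp
  have fOd : (cutB (d :: e :: rest) (2 * m + 1).toNat).map Prod.fst
      = (init.map Prod.fst ++ [lastp.1]) ++ [d] := by rw [hod]; simp
  have fAll : (cutB (e :: rest) m.toNat).map Prod.fst
      = init.map Prod.fst ++ [lastp.1] := by rw [hparts]; simp
  have hgA : gA d orig (init.map Prod.fst ++ [lastp.1])
      = (if lastp.1 * 10 + d ≤ orig then [init.map Prod.fst ++ [lastp.1 * 10 + d]] else [])
        ++ [(init.map Prod.fst ++ [lastp.1]) ++ [d]] := by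
    unfold gA
    rw [show ((PySem.List.pyGet? ((init.map Prod.fst) ++ [lastp.1]) (-1)).getD 0) = lastp.1 by
      rw [PySem.List.pyGet?_neg_one]; simp]
    rw [List.dropLast_concat]
  rw [filter_map_pair, pEv, pOd, pAll, fEv, fOd, fAll, hgA]
  by_cases hI : init.all (okPart orig) = true
  · by_cases hL : okPart orig lastp = true
    · by_cases hb : lastp.1 * 10 + d ≤ orig
      · simp [hI, hL, hb]
      · simp [hI, hL, hb]
    · have hLf : okPart orig lastp = false := Bool.not_eq_true _ |>.mp hL
      have hbad : ¬ lastp.1 ≤ orig := by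
        simp only [okPart, Bool.or_eq_false_iff, decide_eq_false_iff_not] at hLf
        exact hLf.2
      have hb : ¬ (lastp.1 * 10 + d ≤ orig) := by
        have := hlast.1; omega
      simp [hI, hLf, hb]
  · simp [Bool.not_eq_true _ |>.mp hI]

lemma mainAux : ∀ (N : Nat) (n orig : Int), n.toNat ≤ N → 0 < n →
    all_splits n orig = Ecore (digitsRevB n) orig := by
  intro N
  induction N with
  | zero => intro n orig hN h0; omega
  | succ N ih =>
    intro n orig hN h0
    by_cases hsm : n < 10
    · rw [all_splits, dif_pos hsm, digitsRev_small n h0 hsm, Ecore_filter]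
      have h1 : ((2 : Int) ^ (([n] : List Int).length - 1)) = 1 := by simp
      rw [h1]
      have hr : PySem.List.pyRange 0 (1 : Int) 1 = [0] := by decide
      rw [hr]
      simp [cutB, okPart]
    · have h10 : (10 : Int) ≤ n := by omega
      have hq0 : 0 < PySem.Int.floordiv n 10 := by
        rw [PySem.Int.floordiv_eq_ediv_of_pos (by norm_num : (0:Int) < 10)]; omega
      have hqN : (PySem.Int.floordiv n 10).toNat ≤ N := by
        rw [PySem.Int.floordiv_eq_ediv_of_pos (by norm_num : (0:Int) < 10)]
        rw [PySem.Int.floordiv_eq_ediv_of_pos (by norm_num : (0:Int) < 10)] at hq0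
        omega
      have hd0 : 0 ≤ PySem.Int.mod n 10 := PySem.Int.mod_nonneg n (by norm_num)
      -- A side: rewrite the fold as a flatMap of gA
      rw [all_splits, dif_neg hsm]
      have hfun : (fun (out : List (List Int)) lst =>
          (if ((PySem.List.pyGet? lst (-1)).getD 0) * 10 + PySem.Int.mod n 10 ≤ orig then
              out ++ [lst.dropLast ++ [((PySem.List.pyGet? lst (-1)).getD 0) * 10 + PySem.Int.mod n 10]]
            else out) ++ [lst ++ [PySem.Int.mod n 10]])
          = fun out lst => out ++ gA (PySem.Int.mod n 10) orig lst := by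
        funext out lst
        unfold gA
        split_ifs with hb <;> simp
      simp only [hfun]
      rw [PySem.List.foldl_append_eq_flatMap, List.nil_append]
      rw [ih (PySem.Int.floordiv n 10) orig hqN hq0, Ecore_filter, flatMap_filtermap_if]
      -- B side
      obtain ⟨e, rest, hrev⟩ : ∃ e rest, digitsRevB (PySem.Int.floordiv n 10) = e :: rest := by
        cases hh : digitsRevB (PySem.Int.floordiv n 10) with
        | nil => exact absurd hh (digitsRev_ne_nil _ hq0)
        | cons e rest => exact ⟨e, rest, rfl⟩
      rw [digitsRev_step n h10, Ecore_filter]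
      have hlen : (2 : Int) ^ ((PySem.Int.mod n 10 :: digitsRevB (PySem.Int.floordiv n 10)).length - 1)
          = 2 * ((2 ^ ((digitsRevB (PySem.Int.floordiv n 10)).length - 1) : Nat) : Int) := by
        rw [hrev]
        push_cast
        simp [List.length_cons, pow_succ]
        ring
      rw [hlen, range_double, filterMap_flatMap]
      have hcast : ((2 ^ ((digitsRevB (PySem.Int.floordiv n 10)).length - 1) : Nat) : Int)
          = (2 : Int) ^ ((digitsRevB (PySem.Int.floordiv n 10)).length - 1) := by push_cast; ring
      rw [hcast]
      apply Eq.symm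
      refine List.flatMap_congr fun m hm => ?_
      have hm0 : 0 ≤ m := (PySem.List.mem_pyRange_one.mp hm).1
      have hdig : ∀ x ∈ e :: rest, 0 ≤ x := by
        intro x hx
        rw [← hrev] at hx
        exact (digitsRev_mem _ x hx).1
      rw [hrev]
      exact perMask (PySem.Int.mod n 10) orig e rest hd0 hdig m hm0

-- ===== VERDICT (by name: the statement is the Claim_ definition above) =====
theorem all_splits_spec : Claim_equal_all_splits := by
  intro n orig _
  unfold Spec_all_splits
  by_cases h : n < 10
  · rw [all_splits, all_splits_alt]; simp [h]
  · rw [alt_eq_Ecore n orig h]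
    exact mainAux n.toNat n orig le_rfl (by omega)
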